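-- pv_equiv track=rewrite | github.com/sungyongcho/gomoku | back/ai/minmax.py | count_occurrences_with_context
-- ===== SOURCE A (Python) =====
-- def count_occurrences_with_context(
--     line: str, pattern: str, player: str, opponent: str
-- ) -> int:
--     """
--     For each occurrence of 'pattern' in 'line', check the surrounding context
--     to decide if it's open/half-open/blocked. Return a cumulative score.
--
--     Example scoring (tweak as you like):
--       - fully open => +3
--       - half open  => +2
--       - blocked    => +1 (or 0 if you want to ignore fully-blocked patterns)
--     """
--     total_score = 0
--     start = 0
--
--     while True:
--         idx = line.find(pattern, start)
--         if idx == -1: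
--             break
--
--         left_idx = idx - 1
--         right_idx = idx + len(pattern)
--
--         # Get left/right chars, treat out-of-bounds as 'opponent' or a block
--         left_char = line[left_idx] if 0 <= left_idx < len(line) else opponent
--         right_char = line[right_idx] if 0 <= right_idx < len(line) else opponent
--
--         # Decide if open, half-open, or blocked
--         if left_char == "." and right_char == ".":
--             # fully open
--             total_score += 3
--         elif (left_char == "." and right_char != "." and right_char != player) or (
--             right_char == "." and left_char != "." and left_char != player
--         ):
--             # half open => +2
--             total_score += 2
--         # else:
--         #     # fully blocked => +1 or 0
--         #     total_score += 1
--
--         start = idx + 1  # move past this occurrence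
--
--     return total_score
-- ===== SOURCE B (Python) =====
-- def count_occurrences_with_context(
--     line: str, pattern: str, player: str, opponent: str
-- ) -> int:
--     """Rabin-Karp: locate occurrences with a rolling polynomial fingerprint.
--     The base 1114112 exceeds every Unicode code point, so the fingerprint is
--     injective on equal-length strings and fingerprint equality IS substring
--     equality (Python big ints keep it exact)."""
--     n, m = len(line), len(pattern)
--     if m > n:
--         return 0
--     B = 1114112
--     ph = 0
--     for c in pattern:
--         ph = ph * B + ord(c)
--     h = 0
--     for c in line[:m]:
--         h = h * B + ord(c)
--     power = B ** (m - 1) if m else 0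
--     total = 0
--     for i in range(n - m + 1):
--         if h == ph:
--             left = line[i - 1] if i > 0 else opponent
--             right = line[i + m] if i + m < n else opponent
--             if left == "." and right == ".":
--                 total += 3
--             elif (left == "." and right != "." and right != player) or (
--                 right == "." and left != "." and left != player
--             ):
--                 total += 2
--         if m and i + m < n:
--             h = (h - ord(line[i]) * power) * B + ord(line[i + m])
--     return total
-- ===== Notes on version B (the rewrite author's own statement) =====
-- stated objective: alternative
-- what changed: Replaces str.find re-scanning by Rabin-Karp: a rolling polynomial fingerprint (base 1114112, larger than any code point, hence collision-free with Python big ints) is slid over the line and compared with the pattern's fingerprint, so no character-by-character substring matching happens in the loop.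
import Mathlib
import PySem

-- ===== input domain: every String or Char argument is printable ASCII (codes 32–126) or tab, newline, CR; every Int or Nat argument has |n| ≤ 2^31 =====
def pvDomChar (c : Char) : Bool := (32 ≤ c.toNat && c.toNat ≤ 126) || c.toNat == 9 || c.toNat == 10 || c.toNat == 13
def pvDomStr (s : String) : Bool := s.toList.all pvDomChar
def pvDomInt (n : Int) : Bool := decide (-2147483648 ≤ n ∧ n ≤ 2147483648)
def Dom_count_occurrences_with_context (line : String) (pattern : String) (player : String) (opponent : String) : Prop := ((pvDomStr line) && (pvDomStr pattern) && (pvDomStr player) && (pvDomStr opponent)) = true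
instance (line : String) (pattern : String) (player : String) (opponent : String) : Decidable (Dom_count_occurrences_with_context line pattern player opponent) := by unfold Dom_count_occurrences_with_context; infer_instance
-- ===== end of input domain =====

-- B replaces A's str.find re-scanning by a Rabin-Karp rolling polynomial fingerprint
-- (base 1114112, above every code point, hence collision-free); same scores, alternative cost.

-- ===== PORT A =====

-- A's per-occurrence scoring (the body of A's while loop after the find), on .toList strings
def pvCtxScoreA (l p player opponent : List Char) (idx : Nat) : Int :=
  let left_char : List Char :=
    if 1 ≤ idx ∧ idx - 1 < l.length then [l.getD (idx - 1) ' '] else opponent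
  let right_char : List Char :=
    if idx + p.length < l.length then [l.getD (idx + p.length) ' '] else opponent
  if left_char = ['.'] ∧ right_char = ['.'] then 3
  else if (left_char = ['.'] ∧ right_char ≠ ['.'] ∧ right_char ≠ player) ∨
          (right_char = ['.'] ∧ left_char ≠ ['.'] ∧ left_char ≠ player) then 2
  else 0

-- A's while loop: find the next occurrence from 'start', score it, restart at idx+1.
-- (The outer dite is a totality guard: Python's find with start > len(line) returns -1.)
def pvLoopA (l p player opponent : List Char) (start : Nat) : Int :=
  if hs : start ≤ l.length then
    let idx := PySem.Chars.findFrom l p (start : Int) none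
    if h : idx = -1 then 0
    else pvCtxScoreA l p player opponent idx.toNat +
         pvLoopA l p player opponent (idx.toNat + 1)
  else 0
termination_by l.length + 1 - start
decreasing_by
  have hk := PySem.Chars.findFrom_natCast_spec l p start hs h
  omega

def count_occurrences_with_context (line : String) (pattern : String) (player : String) (opponent : String) : Int :=
  pvLoopA line.toList pattern.toList player.toList opponent.toList 0

-- ===== PORT B =====

-- the polynomial fingerprint of Source B: h = h*1114112 + ord(c) over the chars
def pvHash (cs : List Char) : Int :=
  cs.foldl (fun h c => h * 1114112 + (c.toNat : Int)) 0

-- the body of Source B's main loop: update total (on fingerprint hit), then roll the window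
def pvStepB (l player opponent : List Char) (m n : Nat) (ph power : Int)
    (st : Int × Int) (i : Nat) : Int × Int :=
  ( if st.2 = ph then
      let left : List Char := if 0 < i then [l.getD (i - 1) ' '] else opponent
      let right : List Char := if i + m < n then [l.getD (i + m) ' '] else opponent
      if left = ['.'] ∧ right = ['.'] then st.1 + 3
      else if (left = ['.'] ∧ right ≠ ['.'] ∧ right ≠ player) ∨
              (right = ['.'] ∧ left ≠ ['.'] ∧ left ≠ player) then st.1 + 2
      else st.1
    else st.1,
    if m ≠ 0 ∧ i + m < n then
      (st.2 - ((l.getD i ' ').toNat : Int) * power) * 1114112 + ((l.getD (i + m) ' ').toNat : Int)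
    else st.2 )

def count_occurrences_with_context_alt (line : String) (pattern : String) (player : String) (opponent : String) : Int :=
  let l := line.toList
  let p := pattern.toList
  let n := l.length
  let m := p.length
  if m > n then 0
  else
    let ph := pvHash p
    let power : Int := if m = 0 then 0 else (1114112 : Int) ^ (m - 1)
    ((List.range (n - m + 1)).foldl
        (pvStepB l player.toList opponent.toList m n ph power)
        (0, pvHash (l.take m))).1

-- ===== PRECONDITION & SPEC =====
def Spec_count_occurrences_with_context (line : String) (pattern : String) (player : String) (opponent : String) (out : Int) : Prop := out = count_occurrences_with_context_alt line pattern player opponent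
instance (line : String) (pattern : String) (player : String) (opponent : String) (out : Int) : Decidable (Spec_count_occurrences_with_context line pattern player opponent out) := by unfold Spec_count_occurrences_with_context; infer_instance

-- ===== CLAIM (what is proved, stated in full; the proofs are below) =====
def Claim_equal_count_occurrences_with_context : Prop := ∀ (line : String) (pattern : String) (player : String) (opponent : String), Dom_count_occurrences_with_context line pattern player opponent → Spec_count_occurrences_with_context line pattern player opponent (count_occurrences_with_context line pattern player opponent)

-- ===== LEMMAS AND PROOFS =====

-- the sum of scores over all match positions in [start, len+1-m)
def pvSum (l p player opponent : List Char) (start : Nat) : Int :=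
  (((List.range' start (l.length + 1 - p.length - start)).filter
      (fun i => decide ((l.drop i).take p.length = p))).map
    (pvCtxScoreA l p player opponent)).sum

theorem pvLoopA_eq_pvSum (l p player opponent : List Char) :
    ∀ (k start : Nat), l.length + 1 - start ≤ k →
      pvLoopA l p player opponent start = pvSum l p player opponent start := by
  intro k
  induction k with
  | zero =>
    intro start hk
    rw [pvLoopA, dif_neg (by omega)]
    unfold pvSum
    rw [show l.length + 1 - p.length - start = 0 by omega]
    simp
  | succ k ih =>
    intro start hk
    rw [pvLoopA]
    by_cases hs : start ≤ l.length
    · rw [dif_pos hs]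
      rw [PySem.Chars.findFrom_natCast l p start hs]
      by_cases hf : PySem.Chars.find (List.drop start l) p = -1
      · rw [dif_pos (by simp [hf])]
        have hno : ¬ ∃ j, p <+: List.drop j (List.drop start l) := by
          rw [PySem.Chars.exists_prefix_drop_iff_isIn]
          simp [PySem.Chars.isIn_eq_false_iff, ← PySem.Chars.find_eq_neg_one_iff, hf]
        unfold pvSum
        rw [List.filter_eq_nil_iff.mpr ?_]
        · simp
        · intro i hi
          have hmem := List.mem_range'_1.mp hi
          simp only [decide_eq_true_eq]
          intro htake
          exact hno ⟨i - start, by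
            rw [List.drop_drop, show start + (i - start) = i by omega]
            exact List.prefix_iff_eq_take.mpr htake.symm⟩
      · have hf0 : 0 ≤ PySem.Chars.find (List.drop start l) p := by
          have := PySem.Chars.neg_one_le_find (List.drop start l) p
          omega
        have hfl : PySem.Chars.find (List.drop start l) p ≤ (l.length - start : Nat) := by
          have := PySem.Chars.find_le_length (List.drop start l) p
          rwa [List.length_drop] at this
        have hspec := PySem.Chars.find_spec (s := List.drop start l) (sub := p) hf0
        rw [dif_neg (by rw [if_neg hf]; omega)]
        rw [if_neg hf]
        have hjn : ((start : Int) + PySem.Chars.find (List.drop start l) p).toNat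
            = start + (PySem.Chars.find (List.drop start l) p).toNat := by omega
        rw [hjn]
        set fn := (PySem.Chars.find (List.drop start l) p).toNat with hfn
        have hj1 : start + fn ≤ l.length := by omega
        have hp' : p <+: List.drop (start + fn) l := by
          have := hspec.1
          rwa [List.drop_drop] at this
        have hpl : p.length ≤ l.length - (start + fn) := by
          have := hp'.length_le
          rwa [List.length_drop] at this
        unfold pvSum
        rw [show l.length + 1 - p.length - start
              = ((start + fn) - start) + (l.length + 1 - p.length - (start + fn)) by omega]
        rw [← List.range'_append]
        rw [show start + 1 * ((start + fn) - start) = start + fn by omega]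
        rw [List.filter_append, List.map_append, List.sum_append]
        rw [List.filter_eq_nil_iff.mpr ?_]
        · simp only [List.map_nil, List.sum_nil, zero_add]
          rw [show l.length + 1 - p.length - (start + fn)
                = (l.length + 1 - p.length - (start + fn + 1)) + 1 by omega]
          rw [List.range'_succ]
          rw [List.filter_cons_of_pos (by
            simp only [decide_eq_true_eq]
            exact (List.prefix_iff_eq_take.mp hp').symm)]
          simp only [List.map_cons, List.sum_cons]
          rw [ih (start + fn + 1) (by omega)]
          unfold pvSum
          rfl
        · intro i hi
          have hmem := List.mem_range'_1.mp hi
          simp only [decide_eq_true_eq]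
          intro htake
          have hlt : i - start < fn := by omega
          have := hspec.2 (i - start) (by omega)
          rw [List.drop_drop, show start + (i - start) = i by omega] at this
          exact this (List.prefix_iff_eq_take.mpr htake.symm)
    · rw [dif_neg hs]
      unfold pvSum
      have hple : l.length + 1 - p.length - start = 0 := by omega
      rw [hple]
      simp

-- === fingerprint lemmas ===

theorem pvChar_lt (c : Char) : c.toNat < 1114112 := by
  have h := c.valid
  rcases h with h | h
  · exact Nat.lt_trans (by exact_mod_cast h) (by norm_num)
  · exact_mod_cast h.2

theorem pvHash_foldl (cs : List Char) : ∀ a : Int,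
    cs.foldl (fun h c => h * 1114112 + (c.toNat : Int)) a
      = a * 1114112 ^ cs.length + pvHash cs := by
  induction cs with
  | nil => intro a; simp [pvHash]
  | cons c cs ih =>
    intro a
    simp only [List.foldl_cons, List.length_cons, pvHash]
    rw [ih (a * 1114112 + (c.toNat : Int)), ih ((0 : Int) * 1114112 + (c.toNat : Int))]
    ring

theorem pvHash_cons (c : Char) (cs : List Char) :
    pvHash (c :: cs) = (c.toNat : Int) * 1114112 ^ cs.length + pvHash cs := by
  show cs.foldl (fun h c => h * 1114112 + (c.toNat : Int)) ((0 : Int) * 1114112 + c.toNat) = _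
  rw [pvHash_foldl]; ring

theorem pvHash_append_singleton (cs : List Char) (c : Char) :
    pvHash (cs ++ [c]) = pvHash cs * 1114112 + (c.toNat : Int) := by
  unfold pvHash
  rw [List.foldl_append]
  simp

theorem pvHash_nonneg (cs : List Char) : 0 ≤ pvHash cs := by
  induction cs with
  | nil => simp [pvHash]
  | cons c cs ih =>
    rw [pvHash_cons]
    have hc0 : (0 : Int) ≤ (c.toNat : Int) := by positivity
    have hp : (0 : Int) ≤ (1114112 : Int) ^ cs.length := by positivity
    nlinarith

theorem pvHash_lt (cs : List Char) : pvHash cs < 1114112 ^ cs.length := by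
  induction cs with
  | nil => simp [pvHash]
  | cons c cs ih =>
    rw [pvHash_cons]
    have hc : (c.toNat : Int) < 1114112 := by exact_mod_cast pvChar_lt c
    have hc0 : (0 : Int) ≤ (c.toNat : Int) := by positivity
    have hp : (0 : Int) < (1114112 : Int) ^ cs.length := by positivity
    calc (c.toNat : Int) * 1114112 ^ cs.length + pvHash cs
        < ((c.toNat : Int) + 1) * 1114112 ^ cs.length := by nlinarith
      _ ≤ 1114112 * 1114112 ^ cs.length := by nlinarith
      _ = 1114112 ^ (cs.length + 1) := by ring

theorem pvHash_inj : ∀ (cs ds : List Char), cs.length = ds.length →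
    pvHash cs = pvHash ds → cs = ds := by
  intro cs
  induction cs with
  | nil => intro ds hl _; exact (List.length_eq_zero_iff.mp hl.symm).symm
  | cons c cs ih =>
    intro ds hl hh
    cases ds with
    | nil => simp at hl
    | cons d ds =>
      simp only [List.length_cons, Nat.add_right_cancel_iff] at hl
      rw [pvHash_cons, pvHash_cons, ← hl] at hh
      have h1 := pvHash_nonneg cs
      have h2 := pvHash_lt cs
      have h3 := pvHash_nonneg ds
      have h4 := pvHash_lt ds
      rw [← hl] at h4
      have hp : (0 : Int) < (1114112 : Int) ^ cs.length := by positivity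
      have hcd : (c.toNat : Int) = (d.toNat : Int) := by
        rcases lt_trichotomy (c.toNat : Int) (d.toNat : Int) with h | h | h
        · have : (c.toNat : Int) + 1 ≤ (d.toNat : Int) := by omega
          nlinarith
        · exact h
        · have : (d.toNat : Int) + 1 ≤ (c.toNat : Int) := by omega
          nlinarith
      have hceq : c = d := by
        apply Char.ext; exact UInt32.toNat_inj.mp (by exact_mod_cast hcd)
      subst hceq
      have hcs : pvHash cs = pvHash ds := by nlinarith
      rw [ih ds hl hcs]

-- === window lemmas ===

theorem pvWindow_len (l : List Char) (m start : Nat) (h : start + m ≤ l.length) :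
    ((List.drop start l).take m).length = m := by
  simp; omega

theorem pvWindow_roll (l : List Char) (m i : Nat) (hm : m ≠ 0) (hin : i + m < l.length) :
    ((List.drop i l).take m = (l.getD i ' ') :: ((List.drop (i + 1) l).take (m - 1)))
    ∧ ((List.drop (i + 1) l).take m
        = ((List.drop (i + 1) l).take (m - 1)) ++ [l.getD (i + m) ' ']) := by
  obtain ⟨m', rfl⟩ : ∃ m', m = m' + 1 := ⟨m - 1, by omega⟩
  have hi : i < l.length := by omega
  simp only [Nat.add_sub_cancel]
  constructor
  · rw [List.getD_eq_getElem l ' ' hi, List.drop_eq_getElem_cons hi, List.take_succ_cons]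
  · rw [List.take_add_one]
    have hgd : (List.drop (i + 1) l)[m']? = some (l.getD (i + (m' + 1)) ' ') := by
      rw [List.getElem?_drop, show i + 1 + m' = i + (m' + 1) by omega,
          List.getElem?_eq_getElem (by omega), List.getD_eq_getElem l ' ' (by omega)]
    rw [hgd]
    rfl

-- === the B loop step: total component and rolled fingerprint ===

theorem pvSum_cons (l p player opponent : List Char) (start : Nat)
    (h : start + p.length ≤ l.length) :
    pvSum l p player opponent start
      = (if (List.drop start l).take p.length = p
          then pvCtxScoreA l p player opponent start else 0)
        + pvSum l p player opponent (start + 1) := by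
  unfold pvSum
  rw [show l.length + 1 - p.length - start = (l.length + 1 - p.length - (start + 1)) + 1 by omega,
      List.range'_succ]
  by_cases hm : (List.drop start l).take p.length = p
  · rw [List.filter_cons_of_pos (by simpa using hm), if_pos hm]
    simp
  · rw [List.filter_cons_of_neg (by simpa using hm), if_neg hm]
    simp

theorem pvStepB_fst (l p player opponent : List Char) (start : Nat) (t pw : Int)
    (h : start + p.length ≤ l.length) :
    (pvStepB l player opponent p.length l.length (pvHash p) pw
        (t, pvHash ((List.drop start l).take p.length)) start).1
      = t + (if (List.drop start l).take p.length = p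
              then pvCtxScoreA l p player opponent start else 0) := by
  have htest : (pvHash ((List.drop start l).take p.length) = pvHash p)
      ↔ ((List.drop start l).take p.length = p) := by
    constructor
    · intro hh
      exact pvHash_inj _ _ (by rw [pvWindow_len l p.length start h]) hh
    · intro hh; rw [hh]
  unfold pvStepB pvCtxScoreA
  by_cases hm : (List.drop start l).take p.length = p
  · rw [if_pos (htest.mpr hm), if_pos hm]
    simp only []
    rw [show (if 1 ≤ start ∧ start - 1 < l.length
              then [l.getD (start - 1) ' '] else opponent)
          = (if 0 < start then [l.getD (start - 1) ' '] else opponent) from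
        if_congr (by omega) rfl rfl]
    split_ifs <;> ring
  · rw [if_neg (fun hc => hm (htest.mp hc)), if_neg hm]
    simp

theorem pvStepB_snd (l player opponent : List Char) (m start : Nat) (t ph : Int)
    (h : start + m < l.length ∨ m = 0) :
    (pvStepB l player opponent m l.length ph
        (if m = 0 then 0 else (1114112 : Int) ^ (m - 1))
        (t, pvHash ((List.drop start l).take m)) start).2
      = pvHash ((List.drop (start + 1) l).take m) := by
  unfold pvStepB
  by_cases hm0 : m = 0
  · subst hm0
    simp
  · have hlt : start + m < l.length := by tauto
    simp only []
    rw [if_pos ⟨hm0, hlt⟩]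
    obtain ⟨h1, h2⟩ := pvWindow_roll l m start hm0 hlt
    rw [h1, h2, pvHash_cons, pvHash_append_singleton]
    have hlen2 : ((List.drop (start + 1) l).take (m - 1)).length = m - 1 := by
      simp; omega
    rw [hlen2, if_neg hm0]
    ring

-- === the loop invariant: B's fold from position 'start' adds pvSum start ===

theorem pvStepB_inv (l p player opponent : List Char) (hmn : p.length ≤ l.length) :
    ∀ (k start : Nat) (t : Int), start + k = l.length - p.length + 1 →
      ((List.range' start k).foldl
          (pvStepB l player opponent p.length l.length (pvHash p)
            (if p.length = 0 then 0 else (1114112 : Int) ^ (p.length - 1)))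
          (t, pvHash ((List.drop start l).take p.length))).1
        = t + pvSum l p player opponent start := by
  intro k
  induction k with
  | zero =>
    intro start t hsk
    unfold pvSum
    rw [show l.length + 1 - p.length - start = 0 by omega]
    simp
  | succ k ih =>
    intro start t hsk
    have hstart : start + p.length ≤ l.length := by omega
    rw [List.range'_succ, List.foldl_cons]
    cases k with
    | zero =>
      simp only [List.range', List.foldl_nil]
      rw [pvStepB_fst l p player opponent start t _ hstart]
      rw [pvSum_cons l p player opponent start hstart]
      unfold pvSum
      rw [show l.length + 1 - p.length - (start + 1) = 0 by omega]
      simp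
    | succ k =>
      have hnext : start + p.length < l.length ∨ p.length = 0 := by omega
      have hpair : pvStepB l player opponent p.length l.length (pvHash p)
            (if p.length = 0 then 0 else (1114112 : Int) ^ (p.length - 1))
            (t, pvHash ((List.drop start l).take p.length)) start
          = (t + (if (List.drop start l).take p.length = p
                  then pvCtxScoreA l p player opponent start else 0),
             pvHash ((List.drop (start + 1) l).take p.length)) := by
        apply Prod.ext
        · exact pvStepB_fst l p player opponent start t _ hstart
        · exact pvStepB_snd l player opponent p.length start t (pvHash p) hnext
      rw [hpair, ih (start + 1) _ (by omega)]
      rw [pvSum_cons l p player opponent start hstart]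
      ring

theorem alt_eq_pvSum (line pattern player opponent : String) :
    count_occurrences_with_context_alt line pattern player opponent
      = pvSum line.toList pattern.toList player.toList opponent.toList 0 := by
  unfold count_occurrences_with_context_alt
  simp only []
  by_cases hmn : pattern.toList.length > line.toList.length
  · rw [if_pos hmn]
    unfold pvSum
    rw [show line.toList.length + 1 - pattern.toList.length - 0 = 0 by omega]
    simp
  · rw [if_neg hmn]
    rw [List.range_eq_range']
    have h0 : line.toList.take pattern.toList.length
        = (List.drop 0 line.toList).take pattern.toList.length := by simp
    rw [h0]
    rw [pvStepB_inv line.toList pattern.toList player.toList opponent.toList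
          (by omega) (line.toList.length - pattern.toList.length + 1) 0 0 (by omega)]
    simp

-- ===== VERDICT (by name: the statement is the Claim_ definition above) =====
theorem count_occurrences_with_context_spec : Claim_equal_count_occurrences_with_context := by
  intro line pattern player opponent _
  unfold Spec_count_occurrences_with_context count_occurrences_with_context
  rw [pvLoopA_eq_pvSum _ _ _ _ (line.toList.length + 1) 0 (by omega), alt_eq_pvSum]
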